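-- pv_equiv track=rewrite | github.com/RubenMartinezSiso/AC | backtracking_it.py | sumdit
-- ===== SOURCE A (Python) =====
-- def sumdit(aqueduct, value, XS):
--     """sumdit: calculate summation of di iterative"""
--     sumd = 0
--     index1 = 0
--     index2 = value
--     while index2 > 0:
--         exit = False
--         index1 = index2 - 1
--         while index1 > 0 and not exit:
--             if aqueduct[index1] == 0:
--                 index1 -= 1
--             else:
--                 exit = True
--         sumd = sumd + (XS[index2] - XS[index1])**2
--         index2 = index1
--     return sumd
-- ===== SOURCE B (Python) =====
-- def sumdit(aqueduct, value, XS):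
--     """sumdit: calculate summation of di iterative"""
--     if value <= 0:
--         return 0
--     sumd = 0
--     last = XS[0]
--     for i in range(1, value):
--         if aqueduct[i] != 0:
--             sumd += (XS[i] - last) ** 2
--             last = XS[i]
--     return sumd + (XS[value] - last) ** 2
-- ===== Notes on version B (the rewrite author's own statement) =====
-- stated objective: simpler
-- what changed: Replaces A's backward nested while-loops that jump between nonzero indices with a single forward for-loop that keeps only the XS value of the last boundary seen (no index jumping, no inner loop); each squared gap is added when its right boundary is reached, which is valid because the squared-gap sum is direction-independent.
import Mathlib
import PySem

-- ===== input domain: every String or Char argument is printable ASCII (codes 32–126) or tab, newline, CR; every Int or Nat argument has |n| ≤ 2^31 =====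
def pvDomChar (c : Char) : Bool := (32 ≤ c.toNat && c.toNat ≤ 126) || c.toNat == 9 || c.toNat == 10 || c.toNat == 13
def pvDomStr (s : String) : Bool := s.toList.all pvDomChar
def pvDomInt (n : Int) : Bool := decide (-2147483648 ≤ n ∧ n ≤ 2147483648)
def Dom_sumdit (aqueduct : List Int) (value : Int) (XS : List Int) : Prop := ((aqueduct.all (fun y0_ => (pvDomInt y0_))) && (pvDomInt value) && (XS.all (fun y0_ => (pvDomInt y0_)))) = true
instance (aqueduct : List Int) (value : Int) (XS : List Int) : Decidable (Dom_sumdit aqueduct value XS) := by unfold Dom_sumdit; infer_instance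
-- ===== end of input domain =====

-- B replaces A's backward nested while-loops with one forward pass tracking the last boundary's XS value (objective: simpler; return-value equivalence on Pre_).


-- ===== PORT A =====
-- inner while loop: from index1, descend while index1 > 0 and aqueduct[index1] == 0
-- (list accesses are in range under Pre_; ported with getD, exact there)
def sumditInner (aqueduct : List Int) : Nat → Nat
  | 0 => 0
  | i + 1 => if aqueduct.getD (i + 1) 0 = 0 then sumditInner aqueduct i else i + 1

theorem sumditInner_le (aqueduct : List Int) (i : Nat) : sumditInner aqueduct i ≤ i := by
  induction i with
  | zero => simp [sumditInner]
  | succ j ih => simp only [sumditInner]; split <;> omega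

-- outer while loop on index2 (as a Nat, since the loop only runs while index2 > 0)
def sumditLoop (aqueduct XS : List Int) : Nat → Int → Int
  | 0, sumd => sumd
  | i2 + 1, sumd =>
      let i1 := sumditInner aqueduct i2
      sumditLoop aqueduct XS i1 (sumd + (XS.getD (i2 + 1) 0 - XS.getD i1 0) ^ 2)
  decreasing_by exact Nat.lt_succ_of_le (sumditInner_le aqueduct i2)

def sumdit (aqueduct : List Int) (value : Int) (XS : List Int) : Int :=
  sumditLoop aqueduct XS value.toNat 0

-- ===== PORT B =====
-- forward for-loop over range(1, value): state (sumd, last) where last = XS value of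
-- the last boundary seen so far (list accesses in range under Pre_; ported with getD)
def sumditFold (aqueduct XS : List Int) (m : Nat) : Int × Int :=
  (List.range' 1 m).foldl
    (fun st i =>
      if aqueduct.getD i 0 ≠ 0 then (st.1 + (XS.getD i 0 - st.2) ^ 2, XS.getD i 0) else st)
    (0, XS.getD 0 0)

def sumdit_alt (aqueduct : List Int) (value : Int) (XS : List Int) : Int :=
  if value ≤ 0 then 0
  else
    let st := sumditFold aqueduct XS (value.toNat - 1)
    st.1 + (XS.getD value.toNat 0 - st.2) ^ 2

-- ===== PRECONDITION & SPEC =====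
-- Pre_: exactly the inputs where A's indexing never leaves range (otherwise Python raises IndexError):
-- A reads XS[value] and aqueduct at indices 1..value-1 when value > 0.
def Pre_sumdit (aqueduct : List Int) (value : Int) (XS : List Int) : Prop :=
  0 < value → (value < (XS.length : Int) ∧ (1 < value → value ≤ (aqueduct.length : Int)))
instance (aqueduct : List Int) (value : Int) (XS : List Int) : Decidable (Pre_sumdit aqueduct value XS) := by unfold Pre_sumdit; infer_instance

def pvWitness_sumdit : List Int × Int × List Int := ([1, 0, 1], 3, [0, 1, 2, 3])

def Spec_sumdit (aqueduct : List Int) (value : Int) (XS : List Int) (out : Int) : Prop := out = sumdit_alt aqueduct value XS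
instance (aqueduct : List Int) (value : Int) (XS : List Int) (out : Int) : Decidable (Spec_sumdit aqueduct value XS out) := by unfold Spec_sumdit; infer_instance

-- ===== CLAIM (what is proved, stated in full; the proofs are below) =====
def Claim_equal_sumdit : Prop := ∀ (aqueduct : List Int) (value : Int) (XS : List Int), Dom_sumdit aqueduct value XS → Pre_sumdit aqueduct value XS → Spec_sumdit aqueduct value XS (sumdit aqueduct value XS)

-- ===== LEMMAS AND PROOFS =====

-- one forward step of B's fold
theorem sumditFold_succ (aqueduct XS : List Int) (m : Nat) :
    sumditFold aqueduct XS (m + 1) =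
      if aqueduct.getD (m + 1) 0 ≠ 0 then
        ((sumditFold aqueduct XS m).1 + (XS.getD (m + 1) 0 - (sumditFold aqueduct XS m).2) ^ 2,
          XS.getD (m + 1) 0)
      else sumditFold aqueduct XS m := by
  simp only [sumditFold, List.range'_concat, List.foldl_append, List.foldl_cons, List.foldl_nil]
  rw [show 1 + 1 * m = m + 1 by omega]

-- B's fold state, characterised through A's inner-loop result
theorem sumditFold_inner (aqueduct XS : List Int) (m : Nat) :
    sumditFold aqueduct XS m =
      match sumditInner aqueduct m with
      | 0 => (0, XS.getD 0 0)
      | j + 1 =>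
        ((sumditFold aqueduct XS j).1 + (XS.getD (j + 1) 0 - (sumditFold aqueduct XS j).2) ^ 2,
          XS.getD (j + 1) 0) := by
  induction m with
  | zero => simp [sumditFold, sumditInner]
  | succ k ih =>
      rw [sumditFold_succ]
      simp only [sumditInner]
      by_cases h : aqueduct.getD (k + 1) 0 = 0
      · rw [if_neg (not_not_intro h), if_pos h]; exact ih
      · rw [if_pos h, if_neg h]

-- A's outer loop equals B's fold state plus the final segment
theorem sumditLoop_fold (aqueduct XS : List Int) (m : Nat) :
    ∀ s : Int,
      sumditLoop aqueduct XS (m + 1) s =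
        s + (sumditFold aqueduct XS m).1 +
          (XS.getD (m + 1) 0 - (sumditFold aqueduct XS m).2) ^ 2 := by
  induction m using Nat.strong_induction_on with
  | _ m ih =>
    intro s
    rw [sumditLoop]
    have hf := sumditFold_inner aqueduct XS m
    cases hj : sumditInner aqueduct m with
    | zero =>
        have hf' : sumditFold aqueduct XS m = (0, XS.getD 0 0) := by rw [hf, hj]
        simp only [sumditLoop, hf']
        ring
    | succ j =>
        have hf' : sumditFold aqueduct XS m =
            ((sumditFold aqueduct XS j).1 + (XS.getD (j + 1) 0 - (sumditFold aqueduct XS j).2) ^ 2,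
              XS.getD (j + 1) 0) := by rw [hf, hj]
        have hlt : j < m := by have := sumditInner_le aqueduct m; omega
        rw [ih j hlt, hf']
        ring

theorem sumdit_eq_alt (aqueduct : List Int) (value : Int) (XS : List Int) :
    sumdit aqueduct value XS = sumdit_alt aqueduct value XS := by
  unfold sumdit sumdit_alt
  by_cases h : value ≤ 0
  · have : value.toNat = 0 := Int.toNat_of_nonpos h
    simp [h, this, sumditLoop]
  · obtain ⟨m, hm⟩ : ∃ m, value.toNat = m + 1 := ⟨value.toNat - 1, by omega⟩
    simp only [h, if_false, hm, Nat.add_sub_cancel]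
    rw [sumditLoop_fold]
    ring

-- ===== VERDICT (by name: the statement is the Claim_ definition above) =====
theorem sumdit_spec : Claim_equal_sumdit := by
  intro aqueduct value XS _ _
  exact sumdit_eq_alt aqueduct value XS
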